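-- pv_equiv track=rewrite | github.com/Soto92/parallel-computing | VLIW-simulation.py | vliw_compiler
-- ===== SOURCE A (Python) =====
-- def vliw_compiler(instructions, ready):
--     """
--     Groups independent instructions into bundles.
--     """
--     bundles = []
--     current_bundle = []
--     available = set(ready)
--
--     for instr in instructions:
--         op, dest, operands = instr
--         # If all operands are ready, it can go into the current bundle
--         if all(oprnd in available for oprnd in operands):
--             current_bundle.append(instr)
--             available.add(dest)
--         else:
--             # Close the current bundle and start a new one
--             if current_bundle:
--                 bundles.append(current_bundle)
--                 current_bundle = []
--             current_bundle.append(instr)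
--             available.add(dest)
--
--     if current_bundle:
--         bundles.append(current_bundle)
--
--     return bundles
-- ===== SOURCE B (Python) =====
-- def vliw_compiler(instructions, ready):
--     """
--     Groups independent instructions into bundles.
--
--     Staged formulation: precompute a first-definition index table, derive a
--     boolean 'blocked' flag per position (true when some operand is neither
--     initially ready nor defined strictly earlier), then recursively slice the
--     instruction stream into maximal runs ending before blocked positions.
--     """
--     n = len(instructions)
--     first_def = {}
--     for i, (_, dest, _) in enumerate(instructions):
--         if dest not in first_def:
--             first_def[dest] = i
--     ready_set = set(ready)
--     blocked = [i > 0 and any(o not in ready_set and first_def.get(o, n) >= i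
--                              for o in ops)
--                for i, (_, _, ops) in enumerate(instructions)]
--
--     def chunks(start):
--         if start >= n:
--             return []
--         end = start + 1
--         while end < n and not blocked[end]:
--             end += 1
--         return [instructions[start:end]] + chunks(end)
--
--     return chunks(0)
-- ===== Notes on version B (the rewrite author's own statement) =====
-- stated objective: alternative
-- what changed: Replaces A's single greedy pass over a mutated availability set and current-bundle accumulator by staged passes: build a first-definition index table, precompute a per-position boolean 'blocked' flag list, then a recursion (with an inner scan) that slices the instruction stream into maximal runs ending before blocked positions.
import Mathlib
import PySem

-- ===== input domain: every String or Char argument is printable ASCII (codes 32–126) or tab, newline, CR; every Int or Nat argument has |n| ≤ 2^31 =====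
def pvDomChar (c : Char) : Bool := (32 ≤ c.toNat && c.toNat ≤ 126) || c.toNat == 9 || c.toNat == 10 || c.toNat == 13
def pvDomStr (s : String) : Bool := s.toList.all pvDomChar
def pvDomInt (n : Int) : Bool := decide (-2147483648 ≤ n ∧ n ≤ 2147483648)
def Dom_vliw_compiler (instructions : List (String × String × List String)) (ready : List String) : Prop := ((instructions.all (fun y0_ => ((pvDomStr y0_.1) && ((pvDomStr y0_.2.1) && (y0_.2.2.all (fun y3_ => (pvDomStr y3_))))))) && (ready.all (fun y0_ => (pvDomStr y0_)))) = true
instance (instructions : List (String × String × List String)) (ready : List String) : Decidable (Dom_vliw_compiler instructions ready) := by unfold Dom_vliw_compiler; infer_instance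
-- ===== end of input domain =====

-- B replaces A's single pass with a mutated availability set and current-bundle accumulator by staged passes:
-- a first-definition index table, a precomputed per-position 'blocked' flag list, and a recursion that
-- slices the stream into maximal runs; alternative decomposition, same cost.

-- ===== PORT A =====
-- the for-loop of A, as structural recursion over the same (bundles, current_bundle, available) state
def pvALoop (rest : List (String × String × List String))
    (bundles : List (List (String × String × List String)))
    (current : List (String × String × List String))
    (available : PySem.Set String) :
    List (List (String × String × List String)) × List (String × String × List String) × PySem.Set String :=
  match rest with
  | [] => (bundles, current, available)
  | instr :: rest =>
    if instr.2.2.all (fun o => PySem.Set.contains available o) then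
      pvALoop rest bundles (current ++ [instr]) (PySem.Set.add available instr.2.1)
    else if current ≠ [] then
      pvALoop rest (bundles ++ [current]) [instr] (PySem.Set.add available instr.2.1)
    else
      pvALoop rest bundles [instr] (PySem.Set.add available instr.2.1)

def vliw_compiler (instructions : List (String × String × List String)) (ready : List String) : List (List (String × String × List String)) :=
  let r := pvALoop instructions [] [] (PySem.Set.ofList ready)
  if r.2.1 ≠ [] then r.1 ++ [r.2.1] else r.1

-- ===== PORT B =====
-- first pass of B: first_def[dest] = earliest index producing dest
def pvBFirst (i : Nat) (rest : List (String × String × List String))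
    (d : PySem.Dict String Int) : PySem.Dict String Int :=
  match rest with
  | [] => d
  | instr :: rest =>
    pvBFirst (i + 1) rest
      (if PySem.Dict.contains d instr.2.1 then d else PySem.Dict.insert d instr.2.1 (i : Int))

-- second pass of B: the 'blocked' flag comprehension over enumerate(instructions)
def pvBlocked (rset : PySem.Set String) (fp : PySem.Dict String Int) (n : Int)
    (L : List (String × String × List String)) : List Bool :=
  (PySem.List.enumerate L).map (fun p =>
    decide ((0 : Int) < p.1) &&
      p.2.2.2.any (fun o => !(PySem.Set.contains rset o) && decide (p.1 ≤ PySem.Dict.getD fp o n)))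

-- B's inner while-loop: advance end while in range and not blocked
-- (blocked[e] read as List.getD with default false — exact, the guard keeps e < n = blocked.length)
def pvScan (blocked : List Bool) (n e : Nat) : Nat :=
  if h : e < n ∧ blocked.getD e false = false then pvScan blocked n (e + 1) else e
  termination_by n - e
  decreasing_by omega

-- the scan never moves left (cited by pvChunksB's decreasing_by)
theorem pvScan_ge (blocked : List Bool) (n e : Nat) : e ≤ pvScan blocked n e := by
  unfold pvScan
  split
  · next h => have := pvScan_ge blocked n (e + 1); omega
  · exact le_refl e
  termination_by n - e
  decreasing_by omega

-- B's recursion 'chunks': slice one maximal run, recurse on the rest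
def pvChunksB (L : List (String × String × List String)) (blocked : List Bool)
    (n start : Nat) : List (List (String × String × List String)) :=
  if h : start < n then
    PySem.List.slice L (some (start : Int)) (some ((pvScan blocked n (start + 1) : Nat) : Int))
      :: pvChunksB L blocked n (pvScan blocked n (start + 1))
  else []
  termination_by n - start
  decreasing_by have := pvScan_ge blocked n (start + 1); omega

def vliw_compiler_alt (instructions : List (String × String × List String)) (ready : List String) : List (List (String × String × List String)) :=
  let n := instructions.length
  let fp := pvBFirst 0 instructions PySem.Dict.empty
  let rset := PySem.Set.ofList ready
  let blocked := pvBlocked rset fp (n : Int) instructions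
  pvChunksB instructions blocked n 0

-- ===== PRECONDITION & SPEC =====
def Spec_vliw_compiler (instructions : List (String × String × List String)) (ready : List String) (out : List (List (String × String × List String))) : Prop := out = vliw_compiler_alt instructions ready
instance (instructions : List (String × String × List String)) (ready : List String) (out : List (List (String × String × List String))) : Decidable (Spec_vliw_compiler instructions ready out) := by unfold Spec_vliw_compiler; infer_instance

-- ===== CLAIM (what is proved, stated in full; the proofs are below) =====
def Claim_equal_vliw_compiler : Prop := ∀ (instructions : List (String × String × List String)) (ready : List String), Dom_vliw_compiler instructions ready → Spec_vliw_compiler instructions ready (vliw_compiler instructions ready)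

-- ===== LEMMAS AND PROOFS =====

-- mapping over one more taken element
theorem pvMapTakeSucc {a b : Type} (L : List a) (f : a -> b) (i : Nat) (hi : i < L.length) :
    (L.take (i + 1)).map f = (L.take i).map f ++ [f (L[i]'hi)] := by
  have hi2 : i < (L.map f).length := by simpa using hi
  rw [List.map_take, List.map_take, List.take_add_one, List.getElem?_eq_getElem hi2]
  simp

-- entries already present in d survive pvBFirst (insert is guarded by contains)
theorem pvBFirst_preserve (rest : List (String × String × List String)) (i : Nat)
    (d : PySem.Dict String Int) (o : String) (j : Int)
    (h : PySem.Dict.get? d o = some j) :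
    PySem.Dict.get? (pvBFirst i rest d) o = some j := by
  induction rest generalizing i d with
  | nil => simpa [pvBFirst] using h
  | cons instr rest ih =>
    simp only [pvBFirst]
    apply ih
    by_cases hc : PySem.Dict.contains d instr.2.1 = true
    · rw [if_pos hc]; exact h
    · rw [if_neg hc]
      rw [PySem.Dict.get?_insert]
      split
      · next he =>
        rw [PySem.Dict.contains_eq_isSome_get?, ← he, h] at hc
        simp at hc
      · exact h

-- every entry of pvBFirst comes from d or names an occurrence in rest at its index
theorem pvBFirst_sound (rest : List (String × String × List String)) (i : Nat)
    (d : PySem.Dict String Int) (o : String) (j : Int)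
    (h : PySem.Dict.get? (pvBFirst i rest d) o = some j) :
    PySem.Dict.get? d o = some j ∨
      ∃ k, ∃ hk : k < rest.length, (rest[k]'hk).2.1 = o ∧ j = ((i + k : Nat) : Int) := by
  induction rest generalizing i d with
  | nil => left; simpa [pvBFirst] using h
  | cons instr rest ih =>
    simp only [pvBFirst] at h
    rcases ih _ _ h with h' | ⟨k, hk, hdest, hj⟩
    · by_cases hc : PySem.Dict.contains d instr.2.1 = true
      · rw [if_pos hc] at h'; left; exact h'
      · rw [if_neg hc] at h'
        rw [PySem.Dict.get?_insert] at h'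
        split at h'
        · next he =>
          right
          refine ⟨0, by simp, by simp [he], ?_⟩
          injection h' with h''
          omega
        · left; exact h'
    · right
      exact ⟨k + 1, by simpa using Nat.succ_lt_succ hk, by simpa using hdest, by omega⟩

-- the destination at position k gets an index ≤ i + k
theorem pvBFirst_complete (rest : List (String × String × List String)) (i : Nat)
    (d : PySem.Dict String Int)
    (hd : ∀ o j, PySem.Dict.get? d o = some j → ∃ jn : Nat, jn < i ∧ j = (jn : Int))
    (k : Nat) (hk : k < rest.length) :
    ∃ jn : Nat, jn ≤ i + k ∧
      PySem.Dict.get? (pvBFirst i rest d) ((rest[k]'hk).2.1) = some (jn : Int) := by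
  induction rest generalizing i d k with
  | nil => simp at hk
  | cons instr rest ih =>
    cases k with
    | zero =>
      simp only [pvBFirst, List.getElem_cons_zero]
      by_cases hc : PySem.Dict.contains d instr.2.1 = true
      · have hc' := hc
        rw [PySem.Dict.contains_eq_isSome_get?] at hc'
        cases hg : PySem.Dict.get? d instr.2.1 with
        | none => rw [hg] at hc'; simp at hc'
        | some j =>
          obtain ⟨jn, hjn, rfl⟩ := hd _ _ hg
          refine ⟨jn, by omega, ?_⟩
          rw [if_pos hc]
          exact pvBFirst_preserve _ _ _ _ _ hg
      · refine ⟨i, by omega, ?_⟩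
        rw [if_neg hc]
        exact pvBFirst_preserve _ _ _ _ _ (by rw [PySem.Dict.get?_insert]; simp)
    | succ k =>
      simp only [pvBFirst, List.getElem_cons_succ]
      have hd' : ∀ o j, PySem.Dict.get?
          (if PySem.Dict.contains d instr.2.1 then d else PySem.Dict.insert d instr.2.1 (i : Int)) o = some j →
          ∃ jn : Nat, jn < i + 1 ∧ j = (jn : Int) := by
        intro o j hj
        split at hj
        · obtain ⟨jn, h1, h2⟩ := hd _ _ hj; exact ⟨jn, by omega, h2⟩
        · rw [PySem.Dict.get?_insert] at hj
          split at hj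
          · exact ⟨i, by omega, by injection hj with hj; exact hj.symm⟩
          · obtain ⟨jn, h1, h2⟩ := hd _ _ hj; exact ⟨jn, by omega, h2⟩
      obtain ⟨jn, h1, h2⟩ := ih (i + 1) _ hd' k (by simpa using Nat.lt_of_succ_lt_succ (by simpa using hk))
      exact ⟨jn, by omega, h2⟩

-- characterisation of the index test: it is membership in the destinations of the first i instructions
theorem pvFP_lt_iff (L : List (String × String × List String)) (i : Nat) (hi : i ≤ L.length) (o : String) :
    (PySem.Dict.getD (pvBFirst 0 L PySem.Dict.empty) o (L.length : Int) < (i : Int)) ↔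
      o ∈ (L.take i).map (fun t => t.2.1) := by
  induction i with
  | zero =>
    simp only [List.take_zero, List.map_nil, List.not_mem_nil, iff_false, not_lt]
    cases hg : PySem.Dict.get? (pvBFirst 0 L PySem.Dict.empty) o with
    | none => rw [PySem.Dict.getD_eq_get?_getD, hg]; simp
    | some j =>
      rcases pvBFirst_sound _ _ _ _ _ hg with h' | ⟨k, hk, _, rfl⟩
      · simp [PySem.Dict.get?_empty] at h'
      · rw [PySem.Dict.getD_eq_get?_getD, hg]; simp
  | succ i ih =>
    have hi' : i < L.length := by omega
    rw [pvMapTakeSucc L _ i hi']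
    constructor
    · intro h
      cases hg : PySem.Dict.get? (pvBFirst 0 L PySem.Dict.empty) o with
      | none =>
        rw [PySem.Dict.getD_eq_get?_getD, hg] at h
        simp at h; omega
      | some j =>
        rw [PySem.Dict.getD_eq_get?_getD, hg] at h
        simp at h
        by_cases hlt : j < (i : Int)
        · have hmem := (ih (by omega)).mp (by rw [PySem.Dict.getD_eq_get?_getD, hg]; simpa using hlt)
          exact List.mem_append.mpr (Or.inl hmem)
        · have hj : j = (i : Int) := by omega
          rcases pvBFirst_sound _ _ _ _ _ hg with h' | ⟨k, hk, hdest, hjk⟩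
          · simp [PySem.Dict.get?_empty] at h'
          · have hki : k = i := by omega
            subst hki
            exact List.mem_append.mpr (Or.inr (by simp [← hdest]))
    · intro h
      rcases List.mem_append.mp h with h | h
      · have := (ih (by omega)).mpr h
        omega
      · rw [List.mem_singleton] at h
        subst h
        obtain ⟨jn, h1, h2⟩ := pvBFirst_complete L 0 PySem.Dict.empty
          (by intro o j hj; simp [PySem.Dict.get?_empty] at hj) i hi'
        rw [PySem.Dict.getD_eq_get?_getD, h2]
        simp; omega

-- A's availability set tracks the index test through one step
theorem pvStep_avail (L : List (String × String × List String)) (ready : List String)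
    (i : Nat) (hi : i < L.length)
    (avail : PySem.Set String)
    (H : ∀ o, PySem.Set.contains avail o = true ↔
        (o ∈ ready ∨ PySem.Dict.getD (pvBFirst 0 L PySem.Dict.empty) o (L.length : Int) < (i : Int)))
    (o : String) :
    PySem.Set.contains (PySem.Set.add avail (L[i]'hi).2.1) o = true ↔
      (o ∈ ready ∨ PySem.Dict.getD (pvBFirst 0 L PySem.Dict.empty) o (L.length : Int) < ((i + 1 : Nat) : Int)) := by
  rw [PySem.Set.contains_iff, PySem.Set.mem_add]
  rw [pvFP_lt_iff L (i + 1) (by omega) o]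
  rw [pvMapTakeSucc L _ i hi, List.mem_append, List.mem_singleton]
  rw [← PySem.Set.contains_iff, H o, pvFP_lt_iff L i (by omega) o]
  tauto

-- A's fitness test, rewritten through the availability invariant into the index test
theorem pvFits_eq (ops : List String) (ready : List String)
    (fp : PySem.Dict String Int) (n : Int) (i : Nat)
    (avail : PySem.Set String)
    (H : ∀ o, PySem.Set.contains avail o = true ↔
        (o ∈ ready ∨ PySem.Dict.getD fp o n < (i : Int))) :
    ops.all (fun o => PySem.Set.contains avail o)
      = ops.all (fun o => PySem.Set.contains (PySem.Set.ofList ready) o || decide (PySem.Dict.getD fp o n < (i : Int))) := by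
  rw [Bool.eq_iff_iff, List.all_eq_true, List.all_eq_true]
  apply forall_congr'
  intro o
  apply imp_congr_right
  intro _
  rw [H o, Bool.or_eq_true, PySem.Set.contains_iff, PySem.Set.mem_ofList, decide_eq_true_eq]

-- B's any-over-operands is the negation of A's all-over-operands
theorem pvAnyNotAll (ops : List String) (rset : PySem.Set String)
    (fp : PySem.Dict String Int) (n : Int) (iI : Int) :
    ops.any (fun o => !(PySem.Set.contains rset o) && decide (iI ≤ PySem.Dict.getD fp o n))
      = !(ops.all (fun o => PySem.Set.contains rset o || decide (PySem.Dict.getD fp o n < iI))) := by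
  induction ops with
  | nil => simp
  | cons o ops ih =>
    simp only [List.any_cons, List.all_cons, ih, Bool.not_and, Bool.not_or]
    have hdec : decide (iI ≤ PySem.Dict.getD fp o n) = !decide (PySem.Dict.getD fp o n < iI) := by
      rcases lt_or_ge (PySem.Dict.getD fp o n) iI with h | h
      · simp [h, not_le.mpr h]
      · simp [not_lt.mpr h, h]
    rw [hdec]

-- the blocked flag at position i, in terms of the fitness test
theorem pvBlocked_getD (L : List (String × String × List String)) (ready : List String)
    (i : Nat) (hi : i < L.length) :
    (pvBlocked (PySem.Set.ofList ready) (pvBFirst 0 L PySem.Dict.empty) (L.length : Int) L).getD i false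
      = (decide (0 < i) &&
          !((L[i]'hi).2.2.all (fun o => PySem.Set.contains (PySem.Set.ofList ready) o ||
              decide (PySem.Dict.getD (pvBFirst 0 L PySem.Dict.empty) o (L.length : Int) < (i : Int))))) := by
  have hlen : i < (pvBlocked (PySem.Set.ofList ready) (pvBFirst 0 L PySem.Dict.empty) (L.length : Int) L).length := by
    simp only [pvBlocked, List.length_map, PySem.List.length_enumerate]
    exact hi
  rw [List.getD_eq_getElem _ _ hlen]
  simp only [pvBlocked, List.getElem_map, PySem.List.getElem_enumerate]
  rw [pvAnyNotAll]
  have h0 : decide ((0 : Int) < (0 : Int) + (i : Nat)) = decide (0 < i) := by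
    by_cases h : 0 < i <;> simp [h]
  rw [h0]
  norm_num

-- evaluating the while-loop: the scan from c+1 stops exactly at the next blocked position (or n)
theorem pvScan_eq (blocked : List Bool) (n i : Nat) (hin : i ≤ n)
    (hstop : i = n ∨ blocked.getD i false = true) (e : Nat) (he : e ≤ i)
    (hfree : ∀ j, e ≤ j → j < i → blocked.getD j false = false) :
    pvScan blocked n e = i := by
  unfold pvScan
  by_cases hei : e = i
  · subst hei
    rcases hstop with rfl | hb
    · rw [dif_neg (by omega)]
    · rw [dif_neg (by rw [hb]; simp)]
  · have helt : e < i := by omega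
    rw [dif_pos ⟨by omega, hfree e (le_refl e) helt⟩]
    exact pvScan_eq blocked n i hin hstop (e + 1) (by omega)
      (fun j h1 h2 => hfree j (by omega) h2)
  termination_by i - e
  decreasing_by omega

-- one more taken element of a dropped list
theorem pvTakeDropSucc (L : List (String × String × List String)) (c i : Nat)
    (hc : c ≤ i) (hi : i < L.length) :
    (L.drop c).take (i - c) ++ [L[i]'hi] = (L.drop c).take (i + 1 - c) := by
  have h1 : i + 1 - c = (i - c) + 1 := by omega
  have h2 : i - c < (L.drop c).length := by simp; omega
  rw [h1, List.take_add_one, List.getElem?_eq_getElem h2]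
  simp [List.getElem_drop]
  congr 1
  omega

-- main loop invariant: A's loop from index i with current bundle spanning [c, i) yields bA ++ B's chunks from c
theorem pvMain (L : List (String × String × List String)) (ready : List String) :
    ∀ (suffix : List (String × String × List String)) (i c : Nat)
      (bA : List (List (String × String × List String)))
      (avail : PySem.Set String),
      suffix = L.drop i → c < i → i ≤ L.length →
      (∀ o, PySem.Set.contains avail o = true ↔
          (o ∈ ready ∨ PySem.Dict.getD (pvBFirst 0 L PySem.Dict.empty) o (L.length : Int) < (i : Int))) →
      (∀ j, c < j → j < i →
        (pvBlocked (PySem.Set.ofList ready) (pvBFirst 0 L PySem.Dict.empty) (L.length : Int) L).getD j false = false) →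
      (let r := pvALoop suffix bA ((L.drop c).take (i - c)) avail
       if r.2.1 ≠ [] then r.1 ++ [r.2.1] else r.1)
        = bA ++ pvChunksB L (pvBlocked (PySem.Set.ofList ready) (pvBFirst 0 L PySem.Dict.empty) (L.length : Int) L) L.length c := by
  intro suffix
  induction suffix with
  | nil =>
    intro i c bA avail hdrop hci hin H hfree
    have hlen := congrArg List.length hdrop
    simp at hlen
    have hieq : i = L.length := by omega
    subst hieq
    have hcur : (L.drop c).take (L.length - c) ≠ [] := by
      have hl : ((L.drop c).take (L.length - c)).length = L.length - c := by simp
      intro hnil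
      rw [hnil] at hl
      simp at hl
      omega
    have hA : pvALoop [] bA ((L.drop c).take (L.length - c)) avail
        = (bA, (L.drop c).take (L.length - c), avail) := rfl
    simp only [hA]
    rw [if_pos hcur]
    have hscan : pvScan (pvBlocked (PySem.Set.ofList ready) (pvBFirst 0 L PySem.Dict.empty) (L.length : Int) L) L.length (c + 1) = L.length :=
      pvScan_eq _ L.length L.length (le_refl _) (Or.inl rfl) (c + 1) (by omega)
        (fun j h1 h2 => hfree j (by omega) h2)
    rw [pvChunksB, dif_pos (by omega : c < L.length), hscan]
    rw [pvChunksB, dif_neg (by omega)]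
    rw [PySem.List.slice_natCast]
  | cons instr rest ih =>
    intro i c bA avail hdrop hci hin H hfree
    have hi : i < L.length := by
      by_contra hge
      rw [List.drop_eq_nil_of_le (by omega)] at hdrop
      simp at hdrop
    have hcd := (List.getElem_cons_drop hi).trans hdrop.symm
    have hinstr : instr = L[i] := by injection hcd with h _; exact h.symm
    have hrest : rest = L.drop (i + 1) := by injection hcd with _ h; exact h.symm
    have hcur : (L.drop c).take (i - c) ≠ [] := by
      have hl : ((L.drop c).take (i - c)).length = min (i - c) (L.length - c) := by simp
      intro hnil
      rw [hnil] at hl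
      simp at hl
      omega
    have hfits := pvFits_eq instr.2.2 ready (pvBFirst 0 L PySem.Dict.empty) (L.length : Int) i avail H
    have H' : ∀ o, PySem.Set.contains (PySem.Set.add avail instr.2.1) o = true ↔
        (o ∈ ready ∨ PySem.Dict.getD (pvBFirst 0 L PySem.Dict.empty) o (L.length : Int) < ((i + 1 : Nat) : Int)) := by
      intro o
      rw [hinstr]
      exact pvStep_avail L ready i hi avail H o
    simp only [pvALoop]
    by_cases hfit : instr.2.2.all (fun o => PySem.Set.contains avail o) = true
    · -- instruction fits: it joins the current run; position i is not blocked
      rw [if_pos hfit]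
      have hall : (L[i]'hi).2.2.all (fun o => PySem.Set.contains (PySem.Set.ofList ready) o ||
          decide (PySem.Dict.getD (pvBFirst 0 L PySem.Dict.empty) o (L.length : Int) < (i : Int))) = true := by
        rw [← hinstr, ← hfits]; exact hfit
      have hbl : (pvBlocked (PySem.Set.ofList ready) (pvBFirst 0 L PySem.Dict.empty) (L.length : Int) L).getD i false = false := by
        rw [pvBlocked_getD L ready i hi, hall]
        simp
      have hfree' : ∀ j, c < j → j < i + 1 →
          (pvBlocked (PySem.Set.ofList ready) (pvBFirst 0 L PySem.Dict.empty) (L.length : Int) L).getD j false = false := by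
        intro j h1 h2
        by_cases hj : j = i
        · subst hj; exact hbl
        · exact hfree j h1 (by omega)
      have hstep := ih (i + 1) c bA (PySem.Set.add avail instr.2.1) hrest (by omega) (by omega) H' hfree'
      rw [show (L.drop c).take (i - c) ++ [instr] = (L.drop c).take (i + 1 - c) from by
        rw [hinstr]; exact pvTakeDropSucc L c i (by omega) hi]
      exact hstep
    · -- instruction blocked: the current run closes here; position i is blocked
      rw [if_neg hfit, if_pos hcur]
      have hall : (L[i]'hi).2.2.all (fun o => PySem.Set.contains (PySem.Set.ofList ready) o ||
          decide (PySem.Dict.getD (pvBFirst 0 L PySem.Dict.empty) o (L.length : Int) < (i : Int))) = false := by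
        rw [← hinstr, ← hfits]
        exact Bool.eq_false_iff.mpr hfit
      have hbl : (pvBlocked (PySem.Set.ofList ready) (pvBFirst 0 L PySem.Dict.empty) (L.length : Int) L).getD i false = true := by
        rw [pvBlocked_getD L ready i hi, hall]
        simp
        omega
      have hscan : pvScan (pvBlocked (PySem.Set.ofList ready) (pvBFirst 0 L PySem.Dict.empty) (L.length : Int) L) L.length (c + 1) = i :=
        pvScan_eq _ L.length i (by omega) (Or.inr hbl) (c + 1) (by omega)
          (fun j h1 h2 => hfree j (by omega) h2)
      have hchunk : pvChunksB L (pvBlocked (PySem.Set.ofList ready) (pvBFirst 0 L PySem.Dict.empty) (L.length : Int) L) L.length c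
          = (L.drop c).take (i - c) :: pvChunksB L (pvBlocked (PySem.Set.ofList ready) (pvBFirst 0 L PySem.Dict.empty) (L.length : Int) L) L.length i := by
        rw [pvChunksB, dif_pos (by omega : c < L.length), hscan, PySem.List.slice_natCast]
      have hone : [instr] = (L.drop i).take (i + 1 - i) := by
        rw [hinstr]
        have hd := List.getElem_cons_drop hi
        rw [show i + 1 - i = 1 from by omega, ← hd, List.take_succ_cons, List.take_zero]
      have hstep := ih (i + 1) i (bA ++ [(L.drop c).take (i - c)]) (PySem.Set.add avail instr.2.1)
        hrest (by omega) (by omega) H' (fun j h1 h2 => absurd h1 (by omega))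
      rw [hone, hstep, hchunk]
      simp

-- ===== VERDICT (by name: the statement is the Claim_ definition above) =====
theorem vliw_compiler_spec : Claim_equal_vliw_compiler := by
  intro L ready _
  unfold Spec_vliw_compiler vliw_compiler vliw_compiler_alt
  simp only []
  cases hL : L with
  | nil =>
    rw [pvChunksB, dif_neg (by simp)]
    rfl
  | cons instr0 rest0 =>
    subst hL
    have H0 : ∀ o, PySem.Set.contains (PySem.Set.ofList ready) o = true ↔
        (o ∈ ready ∨ PySem.Dict.getD (pvBFirst 0 (instr0 :: rest0) PySem.Dict.empty) o ((instr0 :: rest0).length : Int) < ((0 : Nat) : Int)) := by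
      intro o
      rw [PySem.Set.contains_iff, PySem.Set.mem_ofList, pvFP_lt_iff (instr0 :: rest0) 0 (by omega) o]
      simp
    have H1 := fun o => pvStep_avail (instr0 :: rest0) ready 0 (by simp) (PySem.Set.ofList ready) H0 o
    simp only [List.getElem_cons_zero] at H1
    have hmain := pvMain (instr0 :: rest0) ready rest0 1 0 []
      (PySem.Set.add (PySem.Set.ofList ready) instr0.2.1) rfl (by omega) (by simp) H1
      (fun j h1 h2 => absurd h1 (by omega))
    simp only [Nat.sub_zero, List.drop_zero, List.take_succ_cons, List.take_zero] at hmain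
    have hfirst : pvALoop (instr0 :: rest0) [] [] (PySem.Set.ofList ready)
        = pvALoop rest0 [] [instr0] (PySem.Set.add (PySem.Set.ofList ready) instr0.2.1) := by
      simp only [pvALoop]
      by_cases hfit : instr0.2.2.all (fun o => PySem.Set.contains (PySem.Set.ofList ready) o) = true
      · rw [if_pos hfit, List.nil_append]
      · rw [if_neg hfit, if_neg (by simp)]
    simpa [hfirst] using hmain
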